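-- pv_equiv track=rewrite | github.com/BurlacuVisternicuMatei/BurlacuVisternicuMatei | first/lab2/pb9.py | taller
-- ===== SOURCE A (Python) =====
-- def taller(x):
--
--     small = []
--     for i in range(0, len(x[0])): #merge pe prima linie stanga dreapta
--         j = 1
--         height = x[0][i]
--
--         while j < len(x):
--             if x[j][i] <= height:
--                 small.append(tuple([j, i]))
--             else:
--                 height = x[j][i]
--             j += 1
--
--     return small
-- ===== SOURCE B (Python) =====
-- def taller(x):
--     res = []
--     for i in range(len(x[0])):
--         col = [row[i] for row in x]
--         for j in range(1, len(col)):
--             if col[j] <= max(col[:j]):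
--                 res.append((j, i))
--     return res
-- ===== Notes on version B (the rewrite author's own statement) =====
-- stated objective: simpler
-- what changed: B extracts each column as a list and tests each cell against max() of its prefix slice directly, instead of threading A's mutable running-max scalar through a while loop.
import Mathlib
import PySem

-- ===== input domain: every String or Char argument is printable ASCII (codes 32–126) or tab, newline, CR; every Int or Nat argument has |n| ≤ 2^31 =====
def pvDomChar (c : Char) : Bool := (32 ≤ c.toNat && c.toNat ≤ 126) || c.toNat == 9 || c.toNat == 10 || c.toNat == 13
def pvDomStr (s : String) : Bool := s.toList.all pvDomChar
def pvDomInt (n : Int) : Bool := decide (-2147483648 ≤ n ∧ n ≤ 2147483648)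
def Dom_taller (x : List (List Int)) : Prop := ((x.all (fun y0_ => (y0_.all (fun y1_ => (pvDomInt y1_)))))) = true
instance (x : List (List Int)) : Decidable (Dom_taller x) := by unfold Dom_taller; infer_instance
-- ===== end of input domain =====

-- B replaces A's running-max scalar with a per-column list and a brute-force max over the
-- prefix slice (objective: simpler); return values agree on Pre_, proved below.

-- ===== PORT A =====
-- while-loop body of A: if x[j][i] <= height: small.append((j,i)) else: height = x[j][i]
def tallerInner (x : List (List Int)) (i : Int) (st : Int × List (Int × Int)) (j : Int) :
    Int × List (Int × Int) :=
  let v := PySem.List.pyGetD (PySem.List.pyGetD x j []) i 0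
  if v ≤ st.1 then (st.1, st.2 ++ [(j, i)]) else (v, st.2)

def taller (x : List (List Int)) : List (Int × Int) :=
  (PySem.List.pyRange 0 ((PySem.List.pyGetD x 0 []).length : Int)).foldl
    (fun small i =>
      ((PySem.List.pyRange 1 (x.length : Int)).foldl (tallerInner x i)
        (PySem.List.pyGetD (PySem.List.pyGetD x 0 []) i 0, small)).2)
    []

-- ===== PORT B =====
-- col = [row[i] for row in x]
def colOf (x : List (List Int)) (i : Int) : List Int :=
  x.map (fun row => PySem.List.pyGetD row i 0)

-- max(col[:j])  (Python max of the prefix slice; default only reached outside Pre_)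
def prefMax (col : List Int) (j : Int) : Int :=
  (PySem.List.max? (PySem.List.slice col none (some j)) (fun v => v)).getD 0

-- loop body of B: if col[j] <= max(col[:j]): res.append((j, i))
def altStep (col : List Int) (i : Int) (res : List (Int × Int)) (j : Int) : List (Int × Int) :=
  if PySem.List.pyGetD col j 0 ≤ prefMax col j then res ++ [(j, i)] else res

def taller_alt (x : List (List Int)) : List (Int × Int) :=
  (PySem.List.pyRange 0 ((PySem.List.pyGetD x 0 []).length : Int)).foldl
    (fun res i =>
      (PySem.List.pyRange 1 ((colOf x i).length : Int)).foldl (altStep (colOf x i) i) res)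
    []

-- ===== PRECONDITION & SPEC =====
-- Pre_ excludes exactly the inputs where the Python raises IndexError: empty x (x[0]) and
-- ragged inputs where some row is shorter than the first row (x[j][i]).
def Pre_taller (x : List (List Int)) : Prop :=
  x ≠ [] ∧ ∀ row ∈ x, (x.headD []).length ≤ row.length
instance (x : List (List Int)) : Decidable (Pre_taller x) := by unfold Pre_taller; infer_instance

def pvWitness_taller : List (List Int) := [[1, 2], [0, 3], [2, 1]]

def Spec_taller (x : List (List Int)) (out : List (Int × Int)) : Prop := out = taller_alt x
instance (x : List (List Int)) (out : List (Int × Int)) : Decidable (Spec_taller x out) := by unfold Spec_taller; infer_instance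

-- ===== CLAIM (what is proved, stated in full; the proofs are below) =====
def Claim_equal_taller : Prop := ∀ (x : List (List Int)), Dom_taller x → Pre_taller x → Spec_taller x (taller x)

-- ===== LEMMAS AND PROOFS =====

-- max of a one-element prefix is the head
lemma prefMax_one (c : Int) (t : List Int) : prefMax (c :: t) 1 = c := by
  have h1 : PySem.List.slice (c :: t) none (some 1) = [c] := by
    rw [show (1 : Int) = ((1 : Nat) : Int) from rfl, PySem.List.slice_to_natCast]
    simp
  simp [prefMax, h1, PySem.List.max?_id_cons]

-- extending the prefix by one element takes a max with that element
lemma prefMax_succ (col : List Int) (k : Nat) (h1 : 1 ≤ k) (h2 : k < col.length) :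
    prefMax col ((k : Int) + 1) = max (prefMax col (k : Int)) (col.getD k 0) := by
  have hk1 : ((k : Int) + 1) = (((k + 1 : Nat)) : Int) := by push_cast; ring
  have htake : col.take (k + 1) = col.take k ++ [col[k]] := by
    rw [List.take_add_one]
    simp [List.getElem?_eq_getElem h2]
  obtain ⟨c0, t, hct⟩ : ∃ c0 t, col.take k = c0 :: t := by
    have hne : col.take k ≠ [] := by
      intro h
      rcases List.take_eq_nil_iff.mp h with h0 | h0
      · omega
      · rw [h0] at h2; simp at h2
    exact List.exists_cons_of_ne_nil hne
  rw [prefMax, prefMax, hk1, PySem.List.slice_to_natCast, PySem.List.slice_to_natCast,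
    htake, hct]
  simp [PySem.List.max?_id_cons, List.foldl_append, List.getD,
    List.getElem?_eq_getElem h2]

-- the while loop of A, started at height = max(col[:j]), appends exactly what B's loop appends
lemma inner_eq (col : List Int) (i : Int) :
    ∀ (m : Nat) (j : Int), ((col.length : Int) - j).toNat = m → 1 ≤ j →
    ∀ (acc : List (Int × Int)),
    ((PySem.List.pyRange j (col.length : Int)).foldl
        (fun st j' =>
          let v := PySem.List.pyGetD col j' 0
          if v ≤ st.1 then (st.1, st.2 ++ [(j', i)]) else (v, st.2))
        (prefMax col j, acc)).2
      = (PySem.List.pyRange j (col.length : Int)).foldl (altStep col i) acc := by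
  intro m
  induction m with
  | zero =>
    intro j hm hj acc
    have hle : (col.length : Int) ≤ j := by omega
    rw [PySem.List.pyRange_one_eq_nil hle]
    simp
  | succ m ih =>
    intro j hm hj acc
    have hlt : j < (col.length : Int) := by omega
    rw [PySem.List.pyRange_one_cons hlt]
    simp only [List.foldl_cons]
    set k : Nat := j.toNat with hk
    have hjk : j = (k : Int) := by omega
    have hk1 : 1 ≤ k := by omega
    have hk2 : k < col.length := by omega
    have hget : PySem.List.pyGetD col j 0 = col.getD k 0 := by
      rw [hjk, PySem.List.pyGetD_natCast]
    have hsucc := prefMax_succ col k hk1 hk2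
    rw [← hjk] at hsucc
    have happ := ih (j + 1) (by omega) (by omega)
    rw [altStep, hget]
    by_cases hc : col.getD k 0 ≤ prefMax col j
    · have hmax : prefMax col (j + 1) = prefMax col j := by
        rw [hsucc]; omega
      simp only [if_pos hc]
      rw [← hmax]
      exact happ (acc ++ [(j, i)])
    · have hmax : prefMax col (j + 1) = col.getD k 0 := by
        rw [hsucc]; omega
      simp only [if_neg hc]
      rw [← hmax]
      exact happ acc
-- (the state invariant is carried by writing the height as prefMax col j in the initial state)

-- A's x[j][i] equals B's col[j] for every in-range j (same default outside range, but unused)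
lemma get_col (x : List (List Int)) (i j : Int) (h0 : 0 ≤ j) (h1 : j < (x.length : Int)) :
    PySem.List.pyGetD (PySem.List.pyGetD x j []) i 0
      = PySem.List.pyGetD (colOf x i) j 0 := by
  have hl : (colOf x i).length = x.length := by simp [colOf]
  rw [PySem.List.pyGetD_eq_getElem x [] h0 h1,
    PySem.List.pyGetD_eq_getElem (colOf x i) 0 h0 (by rw [hl]; exact h1)]
  simp [colOf]

-- per-column agreement for a nonempty x
lemma column_eq (r0 : List Int) (rest : List (List Int)) (i : Int)
    (small : List (Int × Int)) :
    ((PySem.List.pyRange 1 ((r0 :: rest).length : Int)).foldl (tallerInner (r0 :: rest) i)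
        (PySem.List.pyGetD (PySem.List.pyGetD (r0 :: rest) 0 []) i 0, small)).2
      = (PySem.List.pyRange 1 ((colOf (r0 :: rest) i).length : Int)).foldl
          (altStep (colOf (r0 :: rest) i) i) small := by
  set x := r0 :: rest with hx
  set col := colOf x i with hcol
  have hlen : col.length = x.length := by simp [hcol, colOf]
  have hcong : (PySem.List.pyRange 1 (x.length : Int)).foldl (tallerInner x i)
      (PySem.List.pyGetD (PySem.List.pyGetD x 0 []) i 0, small)
      = (PySem.List.pyRange 1 (x.length : Int)).foldl
          (fun st j' =>
            let v := PySem.List.pyGetD col j' 0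
            if v ≤ st.1 then (st.1, st.2 ++ [(j', i)]) else (v, st.2))
          (PySem.List.pyGetD (PySem.List.pyGetD x 0 []) i 0, small) := by
    apply PySem.List.foldl_congr_mem
    intro acc j hj
    rw [PySem.List.mem_pyRange_one] at hj
    simp only [tallerInner]
    rw [get_col x i j (by omega) hj.2]
  have hinit : PySem.List.pyGetD (PySem.List.pyGetD x 0 []) i 0 = prefMax col 1 := by
    have hc : col = PySem.List.pyGetD r0 i 0 :: colOf rest i := by
      simp [hcol, hx, colOf]
    rw [hx, PySem.List.pyGetD_zero_cons, hc, prefMax_one]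
  have hrange : ((colOf x i).length : Int) = (x.length : Int) := by
    rw [← hcol, hlen]
  rw [hcong, hinit, hrange]
  have h := inner_eq col i ((col.length : Int) - 1).toNat 1 rfl le_rfl small
  rw [hlen] at h
  exact h

-- ===== VERDICT (by name: the statement is the Claim_ definition above) =====
theorem taller_spec : Claim_equal_taller := by
  intro x _ _
  unfold Spec_taller taller taller_alt
  cases x with
  | nil => simp
  | cons r0 rest =>
    apply PySem.List.foldl_congr_mem
    intro acc i _
    exact column_eq r0 rest i acc
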